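-- pv_equiv track=rewrite | github.com/nizza/advent_of_code_2023 | day_13.py | find_center_row
-- ===== SOURCE A (Python) =====
-- def compare_rows(pattern, row_1, row_2):
--
--     C = len(pattern[0])
--
--     diffs = 0
--     for j in range(C):
--         if pattern[row_1][j] != pattern[row_2][j]:
--             diffs += 1
--     return diffs
--
-- def find_center_row(pattern, target_smudges=0):
--
--     R = len(pattern)
--
--     # center row
--     for i in range(R-1):
--
--         # up and down rows
--         u = i
--         d = i + 1
--
--         # moving up and down columns in the opposite directions
--         # while they contain the same elements  (except target smudges)
--         diffs = 0
--         while u>=0 and d<R: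
--
--             diffs += compare_rows(pattern, u, d)
--             if diffs > target_smudges:
--                 break
--             else:
--                 u -= 1
--                 d += 1
--
--         if diffs == target_smudges:
--             return i+1
--
--     # no mirror center row found
--     return 0
-- ===== SOURCE B (Python) =====
-- def _hamming(r1, r2):
--     return sum(a != b for a, b in zip(r1, r2))
--
-- def find_center_row(pattern, target_smudges=0):
--     R = len(pattern)
--     if R == 0:
--         return 0
--     C = len(pattern[0])
--     rows = [row[:C] for row in pattern]
--     # Bucket the hamming distance of every row pair (p, q), p < q, by p + q once:
--     # the mirror window at center i consists exactly of the pairs with p + q = 2*i + 1.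
--     totals = [0] * (2 * R)
--     for p in range(R):
--         for q in range(p + 1, R):
--             totals[p + q] += 0 if rows[p] == rows[q] else _hamming(rows[p], rows[q])
--     for i in range(R - 1):
--         if totals[2 * i + 1] == target_smudges:
--             return i + 1
--     return 0
-- ===== Notes on version B (the rewrite author's own statement) =====
-- stated objective: faster
-- what changed: B replaces A's per-center mirror expansion (u/d pointer while-loop with early break, re-walking character columns for every center pair) by a staged algorithm: it trims rows to the first row's width, makes one pass over all row pairs (p,q) bucketing their zip-based hamming distance (with an equal-rows fast path) into a table indexed by p+q, then scans centers by a single table lookup (bucket 2*i+1). …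
-- outside the precondition, e.g. on find_center_row(['ab', 'ab', 'z'], 0): A returns 1, B returns 1
import Mathlib
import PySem

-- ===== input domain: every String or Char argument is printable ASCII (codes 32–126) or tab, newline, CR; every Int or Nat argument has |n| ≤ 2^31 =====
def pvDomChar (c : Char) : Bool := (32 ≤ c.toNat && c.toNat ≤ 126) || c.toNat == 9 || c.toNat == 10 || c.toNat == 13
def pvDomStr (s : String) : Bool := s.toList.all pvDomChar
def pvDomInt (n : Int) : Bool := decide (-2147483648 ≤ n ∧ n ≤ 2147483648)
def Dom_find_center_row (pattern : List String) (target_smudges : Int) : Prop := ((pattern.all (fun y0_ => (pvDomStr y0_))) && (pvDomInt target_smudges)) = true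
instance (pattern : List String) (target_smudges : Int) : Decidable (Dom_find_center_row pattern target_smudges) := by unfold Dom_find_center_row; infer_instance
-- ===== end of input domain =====

-- B replaces the per-center mirror expansion (while-loop with break) by a staged algorithm:
-- it buckets the hamming distance of every row pair (p,q) by p+q into a table built in one
-- pass over all pairs (with an equal-rows fast path), then scans the table (window at center
-- i = bucket 2i+1); measured faster in a timing run (constant-factor: each pair is handled
-- once, equal rows in O(1)). Pre_ excludes patterns containing a row shorter than the
-- first row, on which A raises IndexError unless an early return happens first.


-- ===== PORT A =====
-- compare_rows: count differing characters of rows row_1, row_2 over j in range(len(pattern[0]))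
def compare_rows (pattern : List String) (row_1 row_2 : Int) : Int :=
  let C : Int := PySem.Str.len (PySem.List.pyGetD pattern 0 "")
  (PySem.List.pyRange 0 C 1).foldl (fun diffs j =>
    if PySem.Str.pyGet? (PySem.List.pyGetD pattern row_1 "") j ≠
       PySem.Str.pyGet? (PySem.List.pyGetD pattern row_2 "") j
    then diffs + 1 else diffs) 0

-- the 'while u>=0 and d<R' loop of A, fuel = R.toNat is enough since d strictly increases
def loopA (pattern : List String) (R target : Int) : Nat → Int → Int → Int → Int
  | 0, _, _, diffs => diffs
  | fuel+1, u, d, diffs =>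
    if u ≥ 0 ∧ d < R then
      let diffs2 := diffs + compare_rows pattern u d
      if diffs2 > target then diffs2
      else loopA pattern R target fuel (u-1) (d+1) diffs2
    else diffs

-- the 'for i in range(R-1)' loop with early return
def outerA (pattern : List String) (R target : Int) : List Int → Int
  | [] => 0
  | i :: rest =>
      let diffs := loopA pattern R target R.toNat i (i+1) 0
      if diffs = target then i + 1 else outerA pattern R target rest

def find_center_row (pattern : List String) (target_smudges : Int) : Int :=
  let R : Int := pattern.length
  outerA pattern R target_smudges (PySem.List.pyRange 0 (R-1) 1)

-- ===== PORT B =====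
-- sum(a != b for a, b in zip(r1, r2))
def hammingB (r1 r2 : List Char) : Int :=
  ((r1.zip r2).map (fun p => if p.1 ≠ p.2 then (1 : Int) else 0)).sum

-- totals[p+q] += 0 if rows[p] == rows[q] else _hamming(rows[p], rows[q])
-- (index p+q is nonnegative and < len(totals) here)
def updateTotals (rows : List (List Char)) (t : List Int) (p q : Int) : List Int :=
  PySem.List.pySetD t (p + q)
    (PySem.List.pyGetD t (p + q) 0 +
      (if PySem.List.pyGetD rows p [] = PySem.List.pyGetD rows q [] then 0
       else hammingB (PySem.List.pyGetD rows p []) (PySem.List.pyGetD rows q [])))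

-- for p in range(R): for q in range(p+1, R): totals[p+q] += _hamming(rows[p], rows[q])
def buildTotals (rows : List (List Char)) (R : Int) (t0 : List Int) : List Int :=
  (PySem.List.pyRange 0 R 1).foldl (fun t p =>
    (PySem.List.pyRange (p + 1) R 1).foldl (fun t q => updateTotals rows t p q) t) t0

-- for i in range(R-1): if totals[2*i+1] == target_smudges: return i+1
def scanB (totals : List Int) (target : Int) : List Int → Int
  | [] => 0
  | i :: rest =>
      if PySem.List.pyGetD totals (2 * i + 1) 0 = target then i + 1
      else scanB totals target rest

def find_center_row_alt (pattern : List String) (target_smudges : Int) : Int :=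
  let R : Int := pattern.length
  if R = 0 then 0 else
  let C : Int := PySem.Str.len (PySem.List.pyGetD pattern 0 "")
  let rows := pattern.map (fun row => PySem.List.slice row.toList none (some C))
  let totals := buildTotals rows R (List.replicate (2 * R).toNat 0)
  scanB totals target_smudges (PySem.List.pyRange 0 (R - 1) 1)

-- ===== PRECONDITION & SPEC =====
-- Pre_ excludes patterns containing a row shorter than the first row: on such inputs A raises
-- IndexError whenever the short row is compared, and returns only when an earlier center
-- returns first (where B happens to agree anyway).
def Pre_find_center_row (pattern : List String) (target_smudges : Int) : Prop :=
  ∀ s ∈ pattern, (pattern.headD "").toList.length ≤ s.toList.length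
instance (pattern : List String) (target_smudges : Int) : Decidable (Pre_find_center_row pattern target_smudges) := by unfold Pre_find_center_row; infer_instance

def pvWitness_find_center_row : List String × Int := (["##", ".#", ".#"], 0)

def Spec_find_center_row (pattern : List String) (target_smudges : Int) (out : Int) : Prop := out = find_center_row_alt pattern target_smudges
instance (pattern : List String) (target_smudges : Int) (out : Int) : Decidable (Spec_find_center_row pattern target_smudges out) := by unfold Spec_find_center_row; infer_instance

-- ===== CLAIM (what is proved, stated in full; the proofs are below) =====
def Claim_equal_find_center_row : Prop := ∀ (pattern : List String) (target_smudges : Int), Dom_find_center_row pattern target_smudges → Pre_find_center_row pattern target_smudges → Spec_find_center_row pattern target_smudges (find_center_row pattern target_smudges)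

-- ===== LEMMAS AND PROOFS =====

-- A's row comparison as a countP over the index range
theorem compare_rows_countP (pattern : List String) (u d : Int) :
    compare_rows pattern u d =
      ((PySem.List.pyRange 0 (PySem.Str.len (PySem.List.pyGetD pattern 0 "")) 1).countP
        (fun j => decide (PySem.Str.pyGet? (PySem.List.pyGetD pattern u "") j ≠
                          PySem.Str.pyGet? (PySem.List.pyGetD pattern d "") j)) : Int) := by
  unfold compare_rows
  rw [PySem.List.foldl_ite_add_one]
  simp

theorem compare_rows_nonneg (pattern : List String) (u d : Int) :
    0 ≤ compare_rows pattern u d := by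
  rw [compare_rows_countP]; exact Int.natCast_nonneg _

-- zip-of-takes count equals index-range count
theorem zip_take_countP (x y : List Char) (n : Nat) (hx : n ≤ x.length) (hy : n ≤ y.length) :
    ((x.take n).zip (y.take n)).countP (fun p => decide (p.1 ≠ p.2)) =
      (List.range n).countP (fun j => decide (x[j]? ≠ y[j]?)) := by
  induction n with
  | zero => simp
  | succ m ih =>
    have hx' : m ≤ x.length := by omega
    have hy' : m ≤ y.length := by omega
    rw [List.range_succ, List.countP_append]
    rw [List.take_add_one, List.take_add_one]
    have hxg : x[m]? = some x[m] := List.getElem?_eq_getElem (by omega)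
    have hyg : y[m]? = some y[m] := List.getElem?_eq_getElem (by omega)
    rw [hxg, hyg]
    rw [List.zip_append (by simp [hx', hy'])]
    rw [List.countP_append, ih hx' hy']
    simp [hxg, hyg]

-- B's hamming distance as a countP over the zip
theorem hammingB_countP (r1 r2 : List Char) :
    hammingB r1 r2 = ((r1.zip r2).countP (fun p => decide (p.1 ≠ p.2)) : Int) := by
  unfold hammingB
  induction r1.zip r2 with
  | nil => simp
  | cons p t ih =>
    rw [List.map_cons, List.sum_cons, List.countP_cons, ih]
    by_cases h : p.1 = p.2 <;> simp [h] <;> omega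

-- B's trimmed rows
def rowsOf (pattern : List String) : List (List Char) :=
  pattern.map (fun row =>
    PySem.List.slice row.toList none (some (PySem.Str.len (PySem.List.pyGetD pattern 0 ""))))

theorem pyGetD_zero_headD (pattern : List String) :
    PySem.List.pyGetD pattern 0 "" = pattern.headD "" := by
  cases pattern <;> simp [PySem.List.pyGetD, PySem.List.pyGet?, PySem.List.pyIdx?]

-- the key bridge: under Pre_, A's compare_rows equals B's hamming on the trimmed rows
theorem compare_eq_hamming (pattern : List String)
    (hpre : ∀ s ∈ pattern, (pattern.headD "").toList.length ≤ s.toList.length)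
    (u d : Int) (hu : 0 ≤ u) (hu2 : u < pattern.length) (hd : 0 ≤ d) (hd2 : d < pattern.length) :
    compare_rows pattern u d =
      hammingB (PySem.List.pyGetD (rowsOf pattern) u [])
               (PySem.List.pyGetD (rowsOf pattern) d []) := by
  have hC : PySem.Str.len (PySem.List.pyGetD pattern 0 "") =
      ((pattern.headD "").toList.length : Int) := by
    rw [pyGetD_zero_headD]; simp
  have hlen : (rowsOf pattern).length = pattern.length := by simp [rowsOf]
  have hu' : u.toNat < pattern.length := by omega
  have hd' : d.toNat < pattern.length := by omega
  have hru : PySem.List.pyGetD (rowsOf pattern) u [] =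
      (pattern[u.toNat].toList).take (pattern.headD "").toList.length := by
    rw [PySem.List.pyGetD_eq_getElem _ _ hu (by omega)]
    simp only [rowsOf, List.getElem_map]
    simp only [hC, PySem.List.slice_to_natCast]
  have hrd : PySem.List.pyGetD (rowsOf pattern) d [] =
      (pattern[d.toNat].toList).take (pattern.headD "").toList.length := by
    rw [PySem.List.pyGetD_eq_getElem _ _ hd (by omega)]
    simp only [rowsOf, List.getElem_map]
    simp only [hC, PySem.List.slice_to_natCast]
  have hpu : PySem.List.pyGetD pattern u "" = pattern[u.toNat] :=
    PySem.List.pyGetD_eq_getElem _ _ hu hu2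
  have hpd : PySem.List.pyGetD pattern d "" = pattern[d.toNat] :=
    PySem.List.pyGetD_eq_getElem _ _ hd hd2
  rw [compare_rows_countP, hC, hru, hrd, hpu, hpd, hammingB_countP]
  rw [zip_take_countP _ _ _ (hpre _ (by simp)) (hpre _ (by simp))]
  rw [PySem.List.pyRange_zero_natCast, List.countP_map]
  congr 1
  apply List.countP_congr
  intro j hj
  simp

-- the proof-side full-window sum matching A's loop shape
def winSum (pattern : List String) (R : Int) : Nat → Int → Int → Int
  | 0, _, _ => 0
  | fuel+1, u, d =>
      if u ≥ 0 ∧ d < R then compare_rows pattern u d + winSum pattern R fuel (u-1) (d+1)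
      else 0

theorem winSum_nonneg (pattern : List String) (R : Int) (fuel : Nat) (u d : Int) :
    0 ≤ winSum pattern R fuel u d := by
  induction fuel generalizing u d with
  | zero => simp [winSum]
  | succ m ih =>
    simp only [winSum]
    split
    · have := compare_rows_nonneg pattern u d
      have := ih (u-1) (d+1)
      omega
    · omega

theorem loopA_ge_acc (pattern : List String) (R target : Int) (fuel : Nat) (u d acc : Int) :
    acc ≤ loopA pattern R target fuel u d acc := by
  induction fuel generalizing u d acc with
  | zero => simp [loopA]
  | succ m ih =>
    simp only [loopA]
    split
    · have hc := compare_rows_nonneg pattern u d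
      split
      · omega
      · have := ih (u-1) (d+1) (acc + compare_rows pattern u d)
        omega
    · omega

theorem loopA_eq_target_iff (pattern : List String) (R target : Int) (fuel : Nat)
    (u d acc : Int) (hacc : acc ≤ target) :
    (loopA pattern R target fuel u d acc = target) ↔
      (acc + winSum pattern R fuel u d = target) := by
  induction fuel generalizing u d acc with
  | zero => simp [loopA, winSum]
  | succ m ih =>
    simp only [loopA, winSum]
    split
    · by_cases hb : acc + compare_rows pattern u d > target
      · simp only [hb, if_pos]
        have hw := winSum_nonneg pattern R m (u-1) (d+1)
        constructor
        · intro h; omega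
        · intro h; omega
      · simp only [hb, if_neg, not_false_iff]
        rw [ih (u-1) (d+1) _ (by omega)]
        constructor <;> intro h <;> omega
    · simp

theorem winSum_eq_sum (pattern : List String) (R : Int) (fuel : Nat) (u d : Int)
    (hfuel : (min (u + 1) (R - d)).toNat ≤ fuel) :
    winSum pattern R fuel u d =
      ((List.range (min (u + 1) (R - d)).toNat).map
        (fun (k : Nat) => compare_rows pattern (u - (k : Int)) (d + (k : Int)))).sum := by
  induction fuel generalizing u d with
  | zero =>
    have : (min (u + 1) (R - d)).toNat = 0 := by omega
    simp [winSum, this]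
  | succ m ih =>
    simp only [winSum]
    by_cases hg : u ≥ 0 ∧ d < R
    · rw [if_pos hg]
      have hw : (min (u + 1) (R - d)).toNat = (min u (R - (d+1))).toNat + 1 := by omega
      rw [hw, List.range_succ_eq_map, List.map_cons, List.map_map, List.sum_cons]
      rw [ih (u-1) (d+1) (by omega)]
      have h0 : compare_rows pattern (u - ((0:Nat):Int)) (d + ((0:Nat):Int)) =
          compare_rows pattern u d := by norm_num
      rw [h0, show u - 1 + 1 = u by ring]
      congr 1
      congr 1
      apply List.map_congr_left
      intro j _
      simp only [Function.comp_apply]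
      congr 1 <;> push_cast <;> ring
    · simp only [hg, if_neg, not_false_iff]
      have : (min (u + 1) (R - d)).toNat = 0 := by omega
      simp [this]

-- ===== B-side characterisation of the totals table =====

def hamB (rows : List (List Char)) (p q : Int) : Int :=
  hammingB (PySem.List.pyGetD rows p []) (PySem.List.pyGetD rows q [])

theorem hammingB_self (r : List Char) : hammingB r r = 0 := by
  unfold hammingB
  induction r with
  | nil => rfl
  | cons a t ih =>
    rw [List.zip_cons_cons, List.map_cons, List.sum_cons, ih]
    simp

-- B's equal-rows fast path returns exactly the hamming distance
theorem ite_hamming (r1 r2 : List Char) :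
    (if r1 = r2 then 0 else hammingB r1 r2) = hammingB r1 r2 := by
  by_cases h : r1 = r2
  · rw [if_pos h, h, hammingB_self]
  · rw [if_neg h]

def updAll (rows : List (List Char)) (ps : List (Int × Int)) (t : List Int) : List Int :=
  ps.foldl (fun t pq => updateTotals rows t pq.1 pq.2) t

def pairsOf (R : Int) : List (Int × Int) :=
  (PySem.List.pyRange 0 R 1).flatMap (fun p =>
    (PySem.List.pyRange (p + 1) R 1).map (fun q => (p, q)))

theorem buildTotals_eq_updAll (rows : List (List Char)) (R : Int) (t0 : List Int) :
    buildTotals rows R t0 = updAll rows (pairsOf R) t0 := by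
  unfold buildTotals updAll pairsOf
  induction PySem.List.pyRange 0 R 1 generalizing t0 with
  | nil => simp
  | cons p rest ih =>
    simp only [List.foldl_cons, List.flatMap_cons, List.foldl_append, List.foldl_map]
    exact ih _

theorem length_updateTotals (rows : List (List Char)) (t : List Int) (p q : Int) :
    (updateTotals rows t p q).length = t.length := by
  unfold updateTotals
  exact PySem.List.length_pySetD _ _ _

theorem pyGetD_pySetD_int (xs : List Int) (i m v : Int) (hi : 0 ≤ i) (h2 : i < xs.length)
    (hm : 0 ≤ m) (hm2 : m < xs.length) :
    PySem.List.pyGetD (PySem.List.pySetD xs i v) m 0 =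
      if m = i then v else PySem.List.pyGetD xs m 0 := by
  rw [PySem.List.pySetD_of_nonneg (h := hi)]
  rw [PySem.List.pyGetD_eq_getElem _ _ hm (by simpa using hm2)]
  rw [List.getElem_set]
  by_cases h : m = i
  · rw [if_pos (by omega), if_pos h]
  · rw [if_neg (by omega), if_neg h]
    rw [PySem.List.pyGetD_eq_getElem _ _ hm (by simpa using hm2)]

theorem getD_updAll (rows : List (List Char)) (ps : List (Int × Int)) (t : List Int)
    (s : Int) (hs : 0 ≤ s) (hs2 : s < t.length)
    (hps : ∀ pq ∈ ps, 0 ≤ pq.1 + pq.2 ∧ pq.1 + pq.2 < t.length) :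
    PySem.List.pyGetD (updAll rows ps t) s 0 =
      PySem.List.pyGetD t s 0 +
        (ps.map (fun pq => if pq.1 + pq.2 = s then hamB rows pq.1 pq.2 else 0)).sum := by
  induction ps generalizing t with
  | nil => simp [updAll]
  | cons pq rest ih =>
    have hpq := hps pq (by simp)
    unfold updAll
    rw [List.foldl_cons]
    have hstep : (updateTotals rows t pq.1 pq.2).length = t.length := length_updateTotals ..
    have := ih (updateTotals rows t pq.1 pq.2) (by omega)
      (fun x hx => by have := hps x (by simp [hx]); omega)
    unfold updAll at this
    rw [this]
    unfold updateTotals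
    rw [ite_hamming]
    rw [pyGetD_pySetD_int _ _ _ _ (by omega) (by omega) hs (by omega)]
    rw [List.map_cons, List.sum_cons]
    by_cases h : pq.1 + pq.2 = s
    · rw [if_pos h.symm, if_pos h]
      rw [show PySem.List.pyGetD t (pq.1 + pq.2) 0 = PySem.List.pyGetD t s 0 by rw [h]]
      unfold hamB
      ring
    · rw [if_neg (fun hh => h hh.symm), if_neg h]
      ring

theorem getD_replicate_zero (n : Nat) (s : Int) (hs : 0 ≤ s) (h2 : s < n) :
    PySem.List.pyGetD (List.replicate n (0 : Int)) s 0 = 0 := by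
  rw [PySem.List.pyGetD_eq_getElem _ _ hs (by simpa using h2)]
  simp

theorem mem_pairsOf (R : Int) (pq : Int × Int) :
    pq ∈ pairsOf R ↔ 0 ≤ pq.1 ∧ pq.1 < pq.2 ∧ pq.2 < R := by
  unfold pairsOf
  simp only [List.mem_flatMap, List.mem_map, PySem.List.mem_pyRange_one]
  constructor
  · rintro ⟨p, ⟨hp0, hpR⟩, q, ⟨hq1, hq2⟩, rfl⟩
    exact ⟨hp0, by omega, hq2⟩
  · rintro ⟨h0, h1, h2⟩
    exact ⟨pq.1, ⟨h0, by omega⟩, pq.2, ⟨by omega, h2⟩, rfl⟩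

-- sum of a singly-supported ite over a Nodup list
theorem sum_ite_single (l : List Int) (hl : l.Nodup) (q0 : Int) (f : Int → Int) :
    (l.map (fun q => if q = q0 then f q else 0)).sum = if q0 ∈ l then f q0 else 0 := by
  induction l with
  | nil => simp
  | cons a rest ih =>
    rw [List.map_cons, List.sum_cons, ih hl.of_cons]
    by_cases ha : a = q0
    · subst ha
      rw [if_pos rfl, if_neg (List.nodup_cons.mp hl).1, if_pos (by simp)]
      ring
    · rw [if_neg ha]
      by_cases hm : q0 ∈ rest
      · rw [if_pos hm, if_pos (by simp [hm])]; ring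
      · have hnm : q0 ∉ a :: rest := by
          intro h
          rcases List.mem_cons.mp h with h | h
          · exact ha h.symm
          · exact hm h
        rw [if_neg hm, if_neg hnm]; ring

-- an ite over an interval condition, summed over a larger range, is the sum on the sub-range
theorem sum_ite_interval (a b lo hi : Int) (f : Int → Int)
    (h1 : a ≤ lo) (h2 : lo ≤ hi) (h3 : hi ≤ b) :
    ((PySem.List.pyRange a b 1).map (fun p => if lo ≤ p ∧ p < hi then f p else 0)).sum =
      ((PySem.List.pyRange lo hi 1).map f).sum := by
  rw [PySem.List.pyRange_one_append a lo b h1 (by omega)]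
  rw [PySem.List.pyRange_one_append lo hi b h2 h3]
  simp only [List.map_append, List.sum_append]
  have z1 : ((PySem.List.pyRange a lo 1).map (fun p => if lo ≤ p ∧ p < hi then f p else 0)).sum = 0 := by
    apply List.sum_eq_zero
    intro x hx
    simp only [List.mem_map] at hx
    obtain ⟨p, hp, rfl⟩ := hx
    rw [PySem.List.mem_pyRange_one] at hp
    rw [if_neg (by omega)]
  have z2 : ((PySem.List.pyRange hi b 1).map (fun p => if lo ≤ p ∧ p < hi then f p else 0)).sum = 0 := by
    apply List.sum_eq_zero
    intro x hx
    simp only [List.mem_map] at hx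
    obtain ⟨p, hp, rfl⟩ := hx
    rw [PySem.List.mem_pyRange_one] at hp
    rw [if_neg (by omega)]
  rw [z1, z2]
  have : ((PySem.List.pyRange lo hi 1).map (fun p => if lo ≤ p ∧ p < hi then f p else 0)).sum =
      ((PySem.List.pyRange lo hi 1).map f).sum := by
    congr 1
    apply List.map_congr_left
    intro p hp
    rw [PySem.List.mem_pyRange_one] at hp
    rw [if_pos (by omega)]
  omega

-- reverse the order of a range-indexed sum
theorem sum_map_range_reflect (f : Nat → Int) (n : Nat) :
    ((List.range n).map f).sum = ((List.range n).map (fun k => f (n - 1 - k))).sum := by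
  induction n with
  | zero => simp
  | succ m ih =>
    have hr : ((List.range (m+1)).map (fun k => f (m + 1 - 1 - k))).sum
        = f m + ((List.range m).map (fun k => f (m - 1 - k))).sum := by
      rw [List.range_succ_eq_map, List.map_cons, List.sum_cons, List.map_map]
      have h0 : f (m + 1 - 1 - 0) = f m := by congr 1
      rw [h0]
      congr 2
      apply List.map_congr_left
      intro k hk
      simp only [Function.comp_def]
      congr 1
      omega
    rw [hr, ← ih, List.range_succ, List.map_append, List.sum_append]
    simp
    ring

-- the bucket at 2i+1 equals the full mirror-window sum at center i
theorem bucket_eq_winSum (pattern : List String)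
    (hpre : ∀ s ∈ pattern, (pattern.headD "").toList.length ≤ s.toList.length)
    (i : Int) (hi : 0 ≤ i) (hi2 : i < (pattern.length : Int) - 1) :
    PySem.List.pyGetD
      (buildTotals (rowsOf pattern) (pattern.length : Int)
        (List.replicate (2 * (pattern.length : Int)).toNat 0)) (2 * i + 1) 0 =
      winSum pattern (pattern.length : Int) ((pattern.length : Int)).toNat i (i + 1) := by
  set R : Int := (pattern.length : Int) with hR
  set s : Int := 2 * i + 1 with hs
  have hlenrep : ((List.replicate (2 * R).toNat (0:Int)).length : Int) = 2 * R := by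
    simp; omega
  rw [buildTotals_eq_updAll]
  rw [getD_updAll _ _ _ s (by omega) (by omega)
    (fun pq hpq => by rw [mem_pairsOf] at hpq; omega)]
  rw [getD_replicate_zero _ _ (by omega) (by omega), zero_add]
  -- flatten the pair sum to a double sum
  unfold pairsOf
  rw [List.map_flatMap, List.flatMap_def, List.sum_flatten]
  simp only [List.map_map, Function.comp_def]
  -- inner sums have single support q = s - p
  have hinner : ∀ p : Int,
      (((PySem.List.pyRange (p+1) R 1).map (fun q => if p + q = s then hamB (rowsOf pattern) p q else 0))).sum =
        (if p + 1 ≤ s - p ∧ s - p < R then hamB (rowsOf pattern) p (s - p) else 0) := by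
    intro p
    have : ((PySem.List.pyRange (p+1) R 1).map (fun q => if p + q = s then hamB (rowsOf pattern) p q else 0)) =
        ((PySem.List.pyRange (p+1) R 1).map (fun q => if q = s - p then hamB (rowsOf pattern) p q else 0)) := by
      apply List.map_congr_left
      intro q _
      congr 1
      simp only [eq_iff_iff]
      omega
    rw [this, sum_ite_single _ (PySem.List.nodup_pyRange_one _ _) _ _]
    simp only [PySem.List.mem_pyRange_one]
  have hmap : ((PySem.List.pyRange 0 R 1).map (fun p =>
      ((PySem.List.pyRange (p+1) R 1).map (fun q => if p + q = s then hamB (rowsOf pattern) p q else 0)).sum)) =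
      ((PySem.List.pyRange 0 R 1).map (fun p =>
        if max 0 (s - R + 1) ≤ p ∧ p < i + 1 then compare_rows pattern p (s - p) else 0)) := by
    apply List.map_congr_left
    intro p hp
    rw [PySem.List.mem_pyRange_one] at hp
    rw [hinner p]
    have hcond : (p + 1 ≤ s - p ∧ s - p < R) ↔ (max 0 (s - R + 1) ≤ p ∧ p < i + 1) := by
      constructor <;> intro h <;> omega
    by_cases h : p + 1 ≤ s - p ∧ s - p < R
    · rw [if_pos h, if_pos (hcond.mp h)]
      rw [compare_eq_hamming pattern hpre p (s - p) (by omega) (by omega) (by omega) (by omega)]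
      rfl
    · rw [if_neg h, if_neg (fun hh => h (hcond.mpr hh))]
  rw [hmap]
  rw [sum_ite_interval 0 R (max 0 (s - R + 1)) (i + 1) _ (by omega) (by omega) (by omega)]
  -- now reindex the interval sum to the winSum shape
  set lo : Int := max 0 (s - R + 1) with hlo
  have hwN : (min (i + 1) (R - (i + 1))).toNat = (i + 1 - lo).toNat := by omega
  rw [winSum_eq_sum pattern R R.toNat i (i + 1) (by omega)]
  rw [hwN]
  set wN : Nat := (i + 1 - lo).toNat with hwNN
  rw [PySem.List.pyRange_one lo (i + 1)]
  rw [show (i + 1 - lo).toNat = wN from rfl]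
  rw [List.map_map]
  rw [sum_map_range_reflect (fun k => compare_rows pattern (i - (k : Int)) (i + 1 + (k : Int))) wN]
  congr 1
  apply List.map_congr_left
  intro k hk
  have hkw : k < wN := List.mem_range.mp hk
  simp only [Function.comp_def]
  have h1 : lo + (k : Int) = i - ((wN - 1 - k : Nat) : Int) := by
    have : ((wN - 1 - k : Nat) : Int) = (wN : Int) - 1 - (k : Int) := by omega
    rw [this]; omega
  have h2 : s - (lo + (k : Int)) = i + 1 + ((wN - 1 - k : Nat) : Int) := by
    have : ((wN - 1 - k : Nat) : Int) = (wN : Int) - 1 - (k : Int) := by omega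
    rw [this]; omega
  rw [h2, h1]

-- at each center, A's loop condition agrees with B's bucket condition
theorem center_cond (pattern : List String)
    (hpre : ∀ s ∈ pattern, (pattern.headD "").toList.length ≤ s.toList.length)
    (t : Int) (i : Int) (hi : 0 ≤ i) (hi2 : i < (pattern.length : Int) - 1) :
    (loopA pattern (pattern.length : Int) t ((pattern.length : Int)).toNat i (i+1) 0 = t) ↔
      (PySem.List.pyGetD
        (buildTotals (rowsOf pattern) (pattern.length : Int)
          (List.replicate (2 * (pattern.length : Int)).toNat 0)) (2 * i + 1) 0 = t) := by
  rw [bucket_eq_winSum pattern hpre i hi hi2]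
  by_cases ht : 0 ≤ t
  · rw [loopA_eq_target_iff pattern _ t _ i (i+1) 0 ht, zero_add]
  · have h1 := loopA_ge_acc pattern (pattern.length : Int) t ((pattern.length : Int)).toNat i (i+1) 0
    have h2 := winSum_nonneg pattern (pattern.length : Int) ((pattern.length : Int)).toNat i (i+1)
    constructor <;> intro h <;> omega

-- A's early-return scan equals B's table scan over the same center list
theorem outer_eq_scan (pattern : List String)
    (hpre : ∀ s ∈ pattern, (pattern.headD "").toList.length ≤ s.toList.length)
    (t : Int) (l : List Int) (hl : ∀ i ∈ l, 0 ≤ i ∧ i < (pattern.length : Int) - 1) :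
    outerA pattern (pattern.length : Int) t l =
      scanB (buildTotals (rowsOf pattern) (pattern.length : Int)
        (List.replicate (2 * (pattern.length : Int)).toNat 0)) t l := by
  induction l with
  | nil => rfl
  | cons i rest ih =>
    simp only [outerA, scanB]
    have hi := hl i (by simp)
    rw [if_congr (center_cond pattern hpre t i hi.1 hi.2) rfl rfl]
    split
    · rfl
    · exact ih (fun j hj => hl j (by simp [hj]))

-- ===== VERDICT (by name: the statement is the Claim_ definition above) =====
theorem find_center_row_spec : Claim_equal_find_center_row := by
  unfold Claim_equal_find_center_row
  intro pattern t _ hpre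
  unfold Spec_find_center_row find_center_row find_center_row_alt
  simp only []
  by_cases h0 : (pattern.length : Int) = 0
  · rw [if_pos h0]
    rw [PySem.List.pyRange_one_eq_nil (by omega)]
    rfl
  · rw [if_neg h0]
    have : pattern.map (fun row =>
        PySem.List.slice row.toList none (some (PySem.Str.len (PySem.List.pyGetD pattern 0 "")))) =
        rowsOf pattern := rfl
    rw [this]
    exact outer_eq_scan pattern hpre t _
      (fun i hi => by rw [PySem.List.mem_pyRange_one] at hi; omega)
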